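-- pv_equiv track=rewrite | github.com/saenznicolass/landscape-TAP | Ed-And-order-parameter/dependencia_N.py | elem_rep
-- ===== SOURCE A (Python) =====
-- import collections
--
-- def elem_rep(lis):
--     count=collections.Counter(lis)
--     obj=[]
--     rep=[]
--     for key, value in count.items():
--         obj.append(key)
--         rep.append(value)
--     return obj, rep
-- ===== SOURCE B (Python) =====
-- def elem_rep(lis):
--     data = list(lis)
--     obj = []
--     rep = []
--     while data:
--         x = data[0]
--         rest = [y for y in data if y != x]
--         obj.append(x)
--         rep.append(len(data) - len(rest))
--         data = rest
--     return obj, rep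
-- ===== Notes on version B (the rewrite author's own statement) =====
-- stated objective: alternative
-- what changed: Replaces the single-pass Counter tally with a repeated-partition loop: peel off the first element of the remaining worklist, filter out all its occurrences, record the length drop as its count, and continue on the shrunken list until empty.
import Mathlib
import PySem

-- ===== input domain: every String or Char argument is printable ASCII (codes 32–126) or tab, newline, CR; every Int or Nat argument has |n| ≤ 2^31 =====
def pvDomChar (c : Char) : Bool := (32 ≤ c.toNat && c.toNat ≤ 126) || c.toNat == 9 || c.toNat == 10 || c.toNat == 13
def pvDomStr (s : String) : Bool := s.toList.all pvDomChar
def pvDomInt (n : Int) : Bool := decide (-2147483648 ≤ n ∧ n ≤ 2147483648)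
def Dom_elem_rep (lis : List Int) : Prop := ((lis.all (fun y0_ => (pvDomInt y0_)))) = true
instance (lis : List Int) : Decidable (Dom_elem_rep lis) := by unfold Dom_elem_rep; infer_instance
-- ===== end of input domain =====

-- B replaces A's Counter tally with a repeated-partition loop (peel first element,
-- filter out its occurrences, count = length drop); alternative algorithm, same results.

-- ===== PORT A =====
-- count = collections.Counter(lis); then one loop over count.items() appending key/value
def elem_rep (lis : List Int) : List Int × List Int :=
  let count := PySem.Dict.counter lis
  let p := count.items.foldl
    (fun (p : List Int × List Int) kv => (p.1 ++ [kv.1], p.2 ++ [kv.2])) ([], [])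
  (p.1, p.2)

-- ===== PORT B =====
-- the while-loop: data shrinks to the non-x remainder each round
def elemRepLoop (data obj rep : List Int) : List Int × List Int :=
  match data with
  | [] => (obj, rep)
  | x :: xs =>
    let rest := (x :: xs).filter (fun y => y ≠ x)
    elemRepLoop rest (obj ++ [x])
      (rep ++ [((x :: xs).length : Int) - (rest.length : Int)])
  termination_by data.length
  decreasing_by
    simp only [List.filter_cons, decide_not, ne_eq, List.length_cons]
    have h := List.length_filter_le (fun y => !decide (y = x)) xs
    simp at h ⊢
    omega

def elem_rep_alt (lis : List Int) : List Int × List Int :=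
  elemRepLoop lis [] []

-- ===== PRECONDITION & SPEC =====
def Spec_elem_rep (lis : List Int) (out : List Int × List Int) : Prop := out = elem_rep_alt lis
instance (lis : List Int) (out : List Int × List Int) : Decidable (Spec_elem_rep lis out) := by unfold Spec_elem_rep; infer_instance

-- ===== CLAIM (what is proved, stated in full; the proofs are below) =====
def Claim_equal_elem_rep : Prop := ∀ (lis : List Int), Dom_elem_rep lis → Spec_elem_rep lis (elem_rep lis)

-- ===== LEMMAS AND PROOFS =====

-- A's item-unpacking loop over a list of pairs is (map fst, map snd)
theorem foldl_unzip_append {α β : Type} (l : List (α × β)) (a : List α) (b : List β) :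
    l.foldl (fun (p : List α × List β) kv => (p.1 ++ [kv.1], p.2 ++ [kv.2])) (a, b)
      = (a ++ l.map Prod.fst, b ++ l.map Prod.snd) := by
  induction l generalizing a b with
  | nil => simp
  | cons hd tl ih => simp [List.foldl, ih]

-- folding Set.add over a list already containing x skips x's occurrences
theorem foldl_add_filter (x : Int) (l s : List Int) (hx : x ∈ s) :
    l.foldl PySem.Set.add s = (l.filter (fun y => y ≠ x)).foldl PySem.Set.add s := by
  induction l generalizing s with
  | nil => rfl
  | cons y ys ih =>
    by_cases hyx : y = x
    · subst hyx
      simp [PySem.Set.add_of_mem hx, ih s hx]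
    · simp only [List.filter_cons, ne_eq, hyx, not_false_eq_true, decide_true, List.foldl_cons]
      exact ih _ (by simp [PySem.Set.mem_add]; exact Or.inl hx)

-- a fresh head of the accumulator passes through a fold of Set.add over a list avoiding it
theorem foldl_add_cons (x : Int) (l s : List Int) (hx : x ∉ l) :
    l.foldl PySem.Set.add (x :: s) = x :: l.foldl PySem.Set.add s := by
  induction l generalizing s with
  | nil => rfl
  | cons y ys ih =>
    have hyx : y ≠ x := fun h => hx (h ▸ List.mem_cons_self)
    have hys : x ∉ ys := fun h => hx (List.mem_cons_of_mem _ h)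
    simp only [List.foldl_cons]
    rw [PySem.Set.add_eq_ite, PySem.Set.add_eq_ite]
    by_cases hm : y ∈ s
    · simp [hm, hyx, ih _ hys]
    · have : ¬ y ∈ x :: s := by simp [hyx, hm]
      simp [hm, this, ih _ hys]

-- first-seen dedup of x::xs = x followed by dedup of the non-x remainder
theorem ofList_cons_filter (x : Int) (xs : List Int) :
    PySem.Set.ofList (x :: xs) = x :: PySem.Set.ofList (xs.filter (fun y => y ≠ x)) := by
  have h1 : PySem.Set.ofList (x :: xs) = xs.foldl PySem.Set.add [x] := by
    simp [PySem.Set.ofList_eq_foldl, PySem.Set.add, PySem.Set.contains]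
  rw [h1, foldl_add_filter x xs [x] (by simp)]
  have hx : x ∉ xs.filter (fun y => y ≠ x) := by simp
  rw [show ([x] : List Int) = x :: [] from rfl, foldl_add_cons _ _ _ hx,
    PySem.Set.ofList_eq_foldl]

-- filtering out x's occurrences drops exactly count-of-x elements
theorem len_filter_ne_add_count (x : Int) (xs : List Int) :
    (xs.filter (fun y => y ≠ x)).length + xs.count x = xs.length := by
  induction xs with
  | nil => simp
  | cons y ys ih =>
    simp only [ne_eq, decide_not] at ih ⊢
    by_cases h : y = x
    · subst h; simp; omega
    · simp [h]; omega

-- the loop invariant: elemRepLoop appends the uniques and their counts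
theorem elemRepLoop_eq (n : Nat) : ∀ (data : List Int), data.length ≤ n → ∀ (obj rep : List Int),
    elemRepLoop data obj rep
      = (obj ++ PySem.Set.ofList data,
         rep ++ (PySem.Set.ofList data).map (fun k => (data.count k : Int))) := by
  induction n with
  | zero =>
    intro data hlen obj rep
    have : data = [] := List.eq_nil_of_length_eq_zero (Nat.le_zero.mp hlen)
    subst this
    simp [elemRepLoop, PySem.Set.ofList]
  | succ n ih =>
    intro data hlen obj rep
    match data with
    | [] => simp [elemRepLoop, PySem.Set.ofList]
    | x :: xs =>
      have hrest : (x :: xs).filter (fun y => y ≠ x) = xs.filter (fun y => y ≠ x) := by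
        simp
      have hlenrest : (xs.filter (fun y => y ≠ x)).length ≤ n := by
        have := List.length_filter_le (fun y => decide (y ≠ x)) xs
        simp only [List.length_cons] at hlen
        simpa using Nat.le_trans this (by omega)
      rw [elemRepLoop]
      simp only [hrest]
      rw [ih _ hlenrest]
      have hded := ofList_cons_filter x xs
      -- counts of the remaining uniques are unchanged by dropping x's occurrences
      have hmap : (PySem.Set.ofList (xs.filter (fun y => y ≠ x))).map
            (fun k => ((xs.filter (fun y => y ≠ x)).count k : Int))
          = (PySem.Set.ofList (xs.filter (fun y => y ≠ x))).map
            (fun k => ((x :: xs).count k : Int)) := by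
        apply List.map_congr_left
        intro k hk
        have hkr : k ∈ xs.filter (fun y => y ≠ x) :=
          (PySem.Set.mem_ofList _ _).mp hk
        have hknx : k ≠ x := by simpa using (List.of_mem_filter hkr)
        have hc : (xs.filter (fun y => y ≠ x)).count k = xs.count k := by
          rw [List.count_filter]
          simp [hknx]
        have hxk : ¬ x = k := fun h => hknx h.symm
        rw [hc, List.count_cons]
        simp [hxk]
      rw [hmap, hded]
      -- the recorded length drop is the count of x
      have hc := len_filter_ne_add_count x (x :: xs)
      rw [hrest] at hc
      have heq : ((x :: xs).length : Int) - ((xs.filter (fun y => y ≠ x)).length : Int)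
          = ((x :: xs).count x : Int) := by omega
      rw [heq]
      simp

-- ===== VERDICT (by name: the statement is the Claim_ definition above) =====
theorem elem_rep_spec : Claim_equal_elem_rep := by
  intro lis _
  unfold Spec_elem_rep elem_rep elem_rep_alt
  rw [elemRepLoop_eq lis.length lis le_rfl]
  simp [PySem.Dict.items_counter, foldl_unzip_append, List.map_map, Function.comp_def]
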